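-- pv_equiv track=rewrite | github.com/ernkoby5i/learn-python-logia | LOGIA/zajecia_7_0728/bilet_monika_i_inni.py | bilet
-- ===== SOURCE A (Python) =====
-- def bilet(lista):
--     prefiks = 0
--     maxi = 0
--
--     for i in range(2):
--         for j in range(len(lista)):
--             prefiks += lista[j]
--             maxi = max(maxi, prefiks)
--         if maxi == 0:
--             break
--
--     return maxi
-- ===== SOURCE B (Python) =====
-- def bilet(lista):
--     pref = 0
--     pmax = 0
--     for x in lista:
--         pref += x
--         if pref > pmax:
--             pmax = pref
--     return pmax + max(pref, 0)
-- ===== Notes on version B (the rewrite author's own statement) =====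
-- stated objective: simpler
-- what changed: Replaces A's doubled two-pass indexed accumulation with break by a single direct pass maintaining the running prefix sum and its running max, combined in closed form as pmax + max(total, 0).
import Mathlib
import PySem

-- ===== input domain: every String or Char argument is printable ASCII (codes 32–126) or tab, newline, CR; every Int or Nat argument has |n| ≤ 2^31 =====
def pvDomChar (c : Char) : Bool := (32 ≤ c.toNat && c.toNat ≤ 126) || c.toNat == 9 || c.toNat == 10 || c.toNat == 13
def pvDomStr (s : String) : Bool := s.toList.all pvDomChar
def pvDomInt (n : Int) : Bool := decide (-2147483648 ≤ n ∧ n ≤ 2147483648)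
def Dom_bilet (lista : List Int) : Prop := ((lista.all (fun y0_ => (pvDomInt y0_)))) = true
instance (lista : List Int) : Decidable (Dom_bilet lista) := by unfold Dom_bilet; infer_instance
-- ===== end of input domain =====

-- B replaces A's doubled two-pass accumulation (with break) by one pass keeping the
-- running prefix sum and its running max, combined in closed form; return value only.

-- ===== PORT A =====
-- one inner pass of A: 'for j in range(len(lista)): prefiks += lista[j]; maxi = max(maxi, prefiks)'
def biletPass (lista : List Int) (s : Int × Int) : Int × Int :=
  (PySem.List.pyRange 0 (lista.length : Int) 1).foldl
    (fun s j =>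
      let prefiks := s.1 + PySem.List.pyGetD lista j 0
      (prefiks, max s.2 prefiks)) s

def bilet (lista : List Int) : Int :=
  -- outer 'for i in range(2)' with 'if maxi == 0: break' after each pass
  let s1 := biletPass lista (0, 0)
  if s1.2 = 0 then s1.2 else
    let s2 := biletPass lista s1
    if s2.2 = 0 then s2.2 else s2.2

-- ===== PORT B =====
def bilet_alt (lista : List Int) : Int :=
  let s := lista.foldl
    (fun (s : Int × Int) x =>
      (s.1 + x, if s.1 + x > s.2 then s.1 + x else s.2)) ((0 : Int), (0 : Int))
  s.2 + max s.1 0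

-- ===== PRECONDITION & SPEC =====
def Spec_bilet (lista : List Int) (out : Int) : Prop := out = bilet_alt lista
instance (lista : List Int) (out : Int) : Decidable (Spec_bilet lista out) := by unfold Spec_bilet; infer_instance

-- ===== CLAIM (what is proved, stated in full; the proofs are below) =====
def Claim_equal_bilet : Prop := ∀ (lista : List Int), Dom_bilet lista → Spec_bilet lista (bilet lista)

-- ===== LEMMAS AND PROOFS =====

-- the common step function both fold loops compute with
def pvStep (s : Int × Int) (x : Int) : Int × Int := (s.1 + x, max s.2 (s.1 + x))

theorem biletPass_eq_foldl (lista : List Int) (s : Int × Int) :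
    biletPass lista s = lista.foldl pvStep s := by
  unfold biletPass
  exact PySem.List.foldl_pyRange_zero_pyGetD' lista 0 pvStep s

theorem bilet_alt_eq_foldl (lista : List Int) :
    bilet_alt lista = (lista.foldl pvStep (0, 0)).2 + max (lista.foldl pvStep (0, 0)).1 0 := by
  unfold bilet_alt
  have h : (fun (s : Int × Int) x =>
      (s.1 + x, if s.1 + x > s.2 then s.1 + x else s.2)) = pvStep := by
    funext s x
    unfold pvStep
    refine Prod.ext rfl ?_
    simp only
    split <;> omega
  rw [h]

theorem pvStep_maxSplit (l : List Int) (p m n : Int) :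
    (l.foldl pvStep (p, max m n)).2 = max m (l.foldl pvStep (p, n)).2 := by
  induction l generalizing p m n with
  | nil => rfl
  | cons x t ih =>
    simp only [List.foldl_cons, pvStep]
    have h : max (max m n) (p + x) = max m (max n (p + x)) := by omega
    rw [h, ih]

theorem pvStep_fst_le_snd (l : List Int) (p m : Int) (h : p ≤ m) :
    (l.foldl pvStep (p, m)).1 ≤ (l.foldl pvStep (p, m)).2 := by
  induction l generalizing p m with
  | nil => exact h
  | cons x t ih =>
    simp only [List.foldl_cons, pvStep]
    exact ih _ _ (le_max_right _ _)

theorem pvStep_shift (l : List Int) (p m d : Int) :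
    l.foldl pvStep (p + d, m + d)
      = ((l.foldl pvStep (p, m)).1 + d, (l.foldl pvStep (p, m)).2 + d) := by
  induction l generalizing p m with
  | nil => rfl
  | cons x t ih =>
    simp only [List.foldl_cons, pvStep]
    have h1 : p + d + x = p + x + d := by ring
    have h2 : max (m + d) (p + x + d) = max m (p + x) + d := by omega
    rw [h1, h2, ih]

-- the second pass from state (S, M) yields max M (M + S) in the second component
theorem second_pass_snd (l : List Int) :
    (l.foldl pvStep (l.foldl pvStep ((0:Int), (0:Int)))).2
      = max (l.foldl pvStep ((0:Int), (0:Int))).2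
          ((l.foldl pvStep ((0:Int), (0:Int))).2 + (l.foldl pvStep ((0:Int), (0:Int))).1) := by
  set S := (l.foldl pvStep ((0:Int), (0:Int))).1 with hS
  set M := (l.foldl pvStep ((0:Int), (0:Int))).2 with hM
  have hSM : S ≤ M := pvStep_fst_le_snd l 0 0 le_rfl
  have hstate : (l.foldl pvStep ((0:Int), (0:Int))) = (S, M) := by
    rw [hS, hM]
  rw [hstate]
  have hmax : (M : Int) = max M S := by omega
  calc (l.foldl pvStep (S, M)).2
      = (l.foldl pvStep (S, max M S)).2 := by rw [← hmax]
    _ = max M (l.foldl pvStep (S, S)).2 := pvStep_maxSplit l S M S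
    _ = max M (M + S) := by
        have : (S : Int) = 0 + S := by ring
        rw [this]
        have h0 : ((0:Int) + S) = 0 + S := rfl
        rw [pvStep_shift l 0 0 S, ← hM]
        simp [add_comm]

-- ===== VERDICT (by name: the statement is the Claim_ definition above) =====
theorem bilet_spec : Claim_equal_bilet := by
  intro lista _
  unfold Spec_bilet
  rw [bilet_alt_eq_foldl]
  unfold bilet
  simp only [biletPass_eq_foldl]
  set S := (lista.foldl pvStep ((0:Int), (0:Int))).1 with hS
  set M := (lista.foldl pvStep ((0:Int), (0:Int))).2 with hM
  have hSM : S ≤ M := pvStep_fst_le_snd lista 0 0 le_rfl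
  have h2 := second_pass_snd lista
  rw [← hS, ← hM] at h2
  have hstate : (lista.foldl pvStep ((0:Int), (0:Int))) = (S, M) := by rw [hS, hM]
  rw [hstate] at h2
  simp only [hstate]
  split
  · next hc =>
      have hM0 : M = 0 := hc
      show M = M + max S 0
      omega
  · split <;> (rw [h2]; omega)
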